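-- pv_equiv track=rewrite | github.com/Dixith-ai/Learning-Python | advanced/knapsack_problem.py | knapsack_with_constraints
-- ===== SOURCE A (Python) =====
-- def knapsack_with_constraints(weights, values, capacity, max_items):
--     n = len(weights)
--     dp = [[[0] * (max_items + 1) for _ in range(capacity + 1)] for _ in range(n + 1)]
--
--     for i in range(1, n + 1):
--         for w in range(1, capacity + 1):
--             for k in range(1, max_items + 1):
--                 if weights[i - 1] <= w:
--                     dp[i][w][k] = max(values[i - 1] + dp[i - 1][w - weights[i - 1]][k - 1],
--                                      dp[i - 1][w][k])
--                 else:
--                     dp[i][w][k] = dp[i - 1][w][k]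
--
--     return dp[n][capacity][max_items]
-- ===== SOURCE B (Python) =====
-- def knapsack_with_constraints(weights, values, capacity, max_items):
--     # Top-down memoized recursion over (items considered, remaining weight, remaining count)
--     # instead of filling the full (n+1)x(capacity+1)x(max_items+1) table: only reachable
--     # states are ever computed.
--     memo = {}
--
--     def solve(i, w, k):
--         if i == 0 or w <= 0 or k <= 0:
--             return 0
--         key = (i, w, k)
--         if key in memo:
--             return memo[key]
--         skip = solve(i - 1, w, k)
--         if weights[i - 1] <= w:
--             take = values[i - 1] + solve(i - 1, w - weights[i - 1], k - 1)
--             best = take if take > skip else skip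
--         else:
--             best = skip
--         memo[key] = best
--         return best
--
--     return solve(len(weights), capacity, max_items)
-- ===== Notes on version B (the rewrite author's own statement) =====
-- stated objective: faster
-- what changed: Replaces A's bottom-up fill of the whole (n+1)x(capacity+1)x(max_items+1) table with a top-down memoized recursion solve(i, w, k) that computes only the reachable states.
import Mathlib
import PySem

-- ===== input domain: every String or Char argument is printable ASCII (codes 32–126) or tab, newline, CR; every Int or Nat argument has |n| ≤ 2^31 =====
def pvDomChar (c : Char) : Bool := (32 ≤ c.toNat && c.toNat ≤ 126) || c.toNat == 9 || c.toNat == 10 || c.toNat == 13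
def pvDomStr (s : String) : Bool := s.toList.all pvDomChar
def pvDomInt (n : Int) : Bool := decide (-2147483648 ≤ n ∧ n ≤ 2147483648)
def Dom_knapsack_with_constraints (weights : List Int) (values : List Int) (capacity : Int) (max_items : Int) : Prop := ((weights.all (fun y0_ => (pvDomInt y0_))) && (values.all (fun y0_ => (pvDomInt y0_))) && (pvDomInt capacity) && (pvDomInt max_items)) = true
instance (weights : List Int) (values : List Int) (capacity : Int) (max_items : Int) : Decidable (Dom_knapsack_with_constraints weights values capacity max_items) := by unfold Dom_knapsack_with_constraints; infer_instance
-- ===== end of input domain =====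

-- B replaces A's bottom-up fill of the whole (n+1)×(capacity+1)×(max_items+1) table by a
-- top-down memoized recursion that computes only reachable (i, w, k) states.

-- ===== PORT A =====
-- dp[i][w][k] read; Python indexes raise out of range — Pre_ keeps every index used in range,
-- so the [] / 0 defaults of the total pyGetD are never consulted on admitted inputs.
def pvGet3 (dp : List (List (List Int))) (i w k : Int) : Int :=
  PySem.List.pyGetD (PySem.List.pyGetD (PySem.List.pyGetD dp i []) w []) k 0

-- dp[i][w][k] = v (the nested in-place assignment; indices are nonnegative and in range under Pre_)
def pvSet3 (dp : List (List (List Int))) (i w k : Int) (v : Int) : List (List (List Int)) :=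
  PySem.List.pySetD dp i
    (PySem.List.pySetD (PySem.List.pyGetD dp i []) w
      (PySem.List.pySetD (PySem.List.pyGetD (PySem.List.pyGetD dp i []) w []) k v))

-- body of the innermost k-loop of A
def pvStepK (weights values : List Int) (i w : Int) (dp : List (List (List Int))) (k : Int) : List (List (List Int)) :=
  if PySem.List.pyGetD weights (i - 1) 0 ≤ w then
    pvSet3 dp i w k
      (max (PySem.List.pyGetD values (i - 1) 0 +
              pvGet3 dp (i - 1) (w - PySem.List.pyGetD weights (i - 1) 0) (k - 1))
           (pvGet3 dp (i - 1) w k))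
  else
    pvSet3 dp i w k (pvGet3 dp (i - 1) w k)

-- dp = [[[0]*(max_items+1) for _ in range(capacity+1)] for _ in range(n+1)]
def pvInit (n capacity max_items : Int) : List (List (List Int)) :=
  (PySem.List.pyRange 0 (n + 1) 1).map (fun _ =>
    (PySem.List.pyRange 0 (capacity + 1) 1).map (fun _ =>
      List.replicate (max_items + 1).toNat (0 : Int)))

def knapsack_with_constraints (weights : List Int) (values : List Int) (capacity : Int) (max_items : Int) : Int :=
  let n : Int := (weights.length : Int)
  let dp := (PySem.List.pyRange 1 (n + 1) 1).foldl (fun dp i =>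
      (PySem.List.pyRange 1 (capacity + 1) 1).foldl (fun dp w =>
        (PySem.List.pyRange 1 (max_items + 1) 1).foldl (pvStepK weights values i w) dp) dp)
    (pvInit n capacity max_items)
  pvGet3 dp n capacity max_items

-- ===== PORT B =====
-- solve(i, w, k) of Source B; the memo dict is a pure caching device and is dropped in the port
def pvSolve (weights values : List Int) : Nat → Int → Int → Int
  | 0, _, _ => 0
  | t + 1, w, k =>
    if w ≤ 0 ∨ k ≤ 0 then 0
    else
      let skip := pvSolve weights values t w k
      if PySem.List.pyGetD weights (t : Int) 0 ≤ w then
        let take := PySem.List.pyGetD values (t : Int) 0 +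
          pvSolve weights values t (w - PySem.List.pyGetD weights (t : Int) 0) (k - 1)
        if take > skip then take else skip
      else skip

def knapsack_with_constraints_alt (weights : List Int) (values : List Int) (capacity : Int) (max_items : Int) : Int :=
  pvSolve weights values weights.length capacity max_items

-- ===== PRECONDITION & SPEC =====
-- Pre_ is exactly where Python A returns: A raises IndexError for negative capacity or
-- max_items, and (once the loops run, i.e. capacity ≥ 1 and max_items ≥ 1) whenever some
-- item with weights[i] ≤ capacity has a negative weight (dp column index overflows) or no
-- corresponding entry in values.
def Pre_knapsack_with_constraints (weights : List Int) (values : List Int) (capacity : Int) (max_items : Int) : Prop :=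
  0 ≤ capacity ∧ 0 ≤ max_items ∧
  (capacity = 0 ∨ max_items = 0 ∨
    ∀ i ∈ List.range weights.length,
      weights.getD i 0 ≤ capacity → (i < values.length ∧ 0 ≤ weights.getD i 0))

instance (weights : List Int) (values : List Int) (capacity : Int) (max_items : Int) : Decidable (Pre_knapsack_with_constraints weights values capacity max_items) := by unfold Pre_knapsack_with_constraints; infer_instance

def pvWitness_knapsack_with_constraints : List Int × List Int × Int × Int := ([2, 3, 4], [3, 4, 5], 6, 2)

def Spec_knapsack_with_constraints (weights : List Int) (values : List Int) (capacity : Int) (max_items : Int) (out : Int) : Prop := out = knapsack_with_constraints_alt weights values capacity max_items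
instance (weights : List Int) (values : List Int) (capacity : Int) (max_items : Int) (out : Int) : Decidable (Spec_knapsack_with_constraints weights values capacity max_items out) := by unfold Spec_knapsack_with_constraints; infer_instance

-- ===== CLAIM (what is proved, stated in full; the proofs are below) =====
def Claim_equal_knapsack_with_constraints : Prop := ∀ (weights : List Int) (values : List Int) (capacity : Int) (max_items : Int), Dom_knapsack_with_constraints weights values capacity max_items → Pre_knapsack_with_constraints weights values capacity max_items → Spec_knapsack_with_constraints weights values capacity max_items (knapsack_with_constraints weights values capacity max_items)

-- ===== LEMMAS AND PROOFS =====

-- shape of the dp table: n+1 rows of capacity+1 cells of max_items+1 entries each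
def pvShape (n : Nat) (capacity max_items : Int) (dp : List (List (List Int))) : Prop :=
  dp.length = n + 1 ∧ ∀ r ∈ dp, r.length = (capacity + 1).toNat ∧ ∀ c ∈ r, c.length = (max_items + 1).toNat

theorem pvGetD_pySetD_int {α : Type} (xs : List α) (i m : Int) (v d : α)
    (h0 : 0 ≤ i) (h1 : i < (xs.length : Int)) (hm : 0 ≤ m) :
    PySem.List.pyGetD (PySem.List.pySetD xs i v) m d = if m = i then v else PySem.List.pyGetD xs m d := by
  have hi : i = ((i.toNat : Nat) : Int) := by omega
  have hm2 : m = ((m.toNat : Nat) : Int) := by omega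
  rw [hi, hm2, PySem.List.pyGetD_pySetD_natCast xs i.toNat m.toNat v d (by omega)]
  split_ifs with h1' h2' h3' <;> first | rfl | omega

theorem pvRowMem {α : Type} (dp : List (List α)) (i : Int) (h0 : 0 ≤ i) (h1 : i < (dp.length : Int)) :
    PySem.List.pyGetD dp i [] ∈ dp := by
  rw [PySem.List.pyGetD_eq_getElem dp [] h0 h1]
  exact List.getElem_mem _

theorem pvShape_set3 (n : Nat) (capacity max_items : Int) (dp : List (List (List Int)))
    (i w k v : Int) (hs : pvShape n capacity max_items dp)
    (hi : 0 ≤ i ∧ i ≤ (n : Int)) (hw : 0 ≤ w ∧ w ≤ capacity) (hk : 0 ≤ k ∧ k ≤ max_items) :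
    pvShape n capacity max_items (pvSet3 dp i w k v) := by
  obtain ⟨hlen, hrows⟩ := hs
  have hdl : i < (dp.length : Int) := by omega
  have hrow := pvRowMem dp i hi.1 hdl
  obtain ⟨hrlen, hcells⟩ := hrows _ hrow
  have hwl : w < ((PySem.List.pyGetD dp i []).length : Int) := by rw [hrlen]; omega
  have hcell := pvRowMem (PySem.List.pyGetD dp i []) w hw.1 hwl
  obtain hclen := (hcells _ hcell)
  constructor
  · simp [pvSet3, PySem.List.length_pySetD, hlen]
  · intro r hr
    rw [pvSet3, PySem.List.pySetD_of_nonneg _ _ hi.1] at hr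
    rcases List.mem_or_eq_of_mem_set hr with hr' | hr'
    · exact hrows r hr'
    · subst hr'
      constructor
      · simpa [PySem.List.length_pySetD] using hrlen
      · intro c hc
        rw [PySem.List.pySetD_of_nonneg _ _ hw.1] at hc
        rcases List.mem_or_eq_of_mem_set hc with hc' | hc'
        · exact hcells c hc'
        · subst hc'
          simpa [PySem.List.length_pySetD] using hclen

theorem pvGet3_set3 (n : Nat) (capacity max_items : Int) (dp : List (List (List Int)))
    (i w k v : Int) (hs : pvShape n capacity max_items dp)
    (hi : 0 ≤ i ∧ i ≤ (n : Int)) (hw : 0 ≤ w ∧ w ≤ capacity) (hk : 0 ≤ k ∧ k ≤ max_items)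
    (i' w' k' : Int) (hi' : 0 ≤ i') (hw' : 0 ≤ w') (hk' : 0 ≤ k') :
    pvGet3 (pvSet3 dp i w k v) i' w' k' =
      if i' = i ∧ w' = w ∧ k' = k then v else pvGet3 dp i' w' k' := by
  obtain ⟨hlen, hrows⟩ := hs
  have hdl : i < (dp.length : Int) := by omega
  have hrow := pvRowMem dp i hi.1 hdl
  obtain ⟨hrlen, hcells⟩ := hrows _ hrow
  have hwl : w < ((PySem.List.pyGetD dp i []).length : Int) := by rw [hrlen]; omega
  have hcell := pvRowMem (PySem.List.pyGetD dp i []) w hw.1 hwl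
  have hkl : k < ((PySem.List.pyGetD (PySem.List.pyGetD dp i []) w []).length : Int) := by
    rw [hcells _ hcell]; omega
  rw [pvGet3, pvSet3, pvGetD_pySetD_int dp i i' _ _ hi.1 hdl hi']
  by_cases h1 : i' = i
  · subst h1
    rw [if_pos rfl]
    rw [pvGetD_pySetD_int _ w w' _ _ hw.1 hwl hw']
    by_cases h2 : w' = w
    · subst h2
      rw [if_pos rfl]
      rw [pvGetD_pySetD_int _ k k' _ _ hk.1 hkl hk']
      by_cases h3 : k' = k
      · simp [h3]
      · simp [h3, pvGet3]
    · simp [h2, pvGet3]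
  · simp [h1, pvGet3]

theorem pvShape_init (n : Nat) (capacity max_items : Int) :
    pvShape n capacity max_items (pvInit (n : Int) capacity max_items) := by
  refine ⟨?_, ?_⟩
  · simp [pvInit, PySem.List.length_pyRange_one]
  · intro r hr
    simp only [pvInit, List.mem_map] at hr
    obtain ⟨x, _, hx⟩ := hr
    subst hx
    refine ⟨by simp [PySem.List.length_pyRange_one], ?_⟩
    intro c hc
    simp only [List.mem_map] at hc
    obtain ⟨y, _, hy⟩ := hc
    subst hy
    simp

theorem pvGet3_init (n : Nat) (capacity max_items : Int) (i w k : Int)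
    (hi : 0 ≤ i ∧ i ≤ (n : Int)) (hw : 0 ≤ w ∧ w ≤ capacity) (hk : 0 ≤ k ∧ k ≤ max_items) :
    pvGet3 (pvInit (n : Int) capacity max_items) i w k = 0 := by
  rw [pvGet3, pvInit]
  rw [PySem.List.pyGetD_map_pyRange_of_nonneg _ _ _ _ hi.1 (by omega)]
  rw [PySem.List.pyGetD_map_pyRange_of_nonneg _ _ _ _ hw.1 (by omega)]
  rw [PySem.List.pyGetD_eq_getElem _ _ hk.1 (by simp; omega)]
  simp

theorem pvSolve_w_nonpos (weights values : List Int) (t : Nat) (w k : Int) (h : w ≤ 0) :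
    pvSolve weights values t w k = 0 := by
  cases t <;> simp [pvSolve, h]

theorem pvSolve_k_nonpos (weights values : List Int) (t : Nat) (w k : Int) (h : k ≤ 0) :
    pvSolve weights values t w k = 0 := by
  cases t <;> simp [pvSolve, h]

theorem pvFoldlConst {α β : Type} (l : List α) (dp : β) :
    l.foldl (fun dp _ => dp) dp = dp := by
  induction l generalizing dp with
  | nil => rfl
  | cons x xs ih => simpa using ih dp

theorem pvLoopK (weights values : List Int) (capacity max_items : Int) (n : Nat)
    (i w : Int) (hi : 1 ≤ i ∧ i ≤ (n : Int)) (hw : 1 ≤ w ∧ w ≤ capacity)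
    (dp : List (List (List Int))) (hs : pvShape n capacity max_items dp)
    (K : Nat) (hK : (K : Int) ≤ max_items) :
    pvShape n capacity max_items ((PySem.List.pyRange 1 ((K : Int) + 1) 1).foldl (pvStepK weights values i w) dp) ∧
    (∀ i' w' k' : Int, 0 ≤ i' → 0 ≤ w' → 0 ≤ k' → (i' ≠ i ∨ w' ≠ w) →
      pvGet3 ((PySem.List.pyRange 1 ((K : Int) + 1) 1).foldl (pvStepK weights values i w) dp) i' w' k' = pvGet3 dp i' w' k') ∧
    (∀ k : Int, 1 ≤ k → k ≤ (K : Int) →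
      pvGet3 ((PySem.List.pyRange 1 ((K : Int) + 1) 1).foldl (pvStepK weights values i w) dp) i w k =
        (if PySem.List.pyGetD weights (i - 1) 0 ≤ w then
            max (PySem.List.pyGetD values (i - 1) 0 +
                  pvGet3 dp (i - 1) (w - PySem.List.pyGetD weights (i - 1) 0) (k - 1))
                (pvGet3 dp (i - 1) w k)
          else pvGet3 dp (i - 1) w k)) ∧
    (∀ k : Int, 0 ≤ k → (k ≤ 0 ∨ (K : Int) < k) →
      pvGet3 ((PySem.List.pyRange 1 ((K : Int) + 1) 1).foldl (pvStepK weights values i w) dp) i w k = pvGet3 dp i w k) := by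
  induction K with
  | zero =>
    rw [show (((0:Nat) : Int) + 1) = 1 by norm_num, PySem.List.pyRange_one_eq_nil (by omega)]
    exact ⟨hs, fun _ _ _ _ _ _ _ => rfl, fun k h1 h2 => by exact_mod_cast absurd (h1.trans h2) (by norm_num), fun _ _ _ => rfl⟩
  | succ K ih =>
    have hK' : (K : Int) ≤ max_items := by push_cast at hK ⊢; omega
    obtain ⟨ihS, ihU, ihF, ihZ⟩ := ih hK'
    have hcast : (((K+1:Nat)) : Int) + 1 = ((K : Int) + 1) + 1 := by push_cast; ring
    rw [hcast, PySem.List.pyRange_one_succ_right (by omega), List.foldl_append, List.foldl_cons, List.foldl_nil]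
    set dpK := (PySem.List.pyRange 1 ((K:Int)+1) 1).foldl (pvStepK weights values i w) dp with hdpK
    have hiB : 0 ≤ i ∧ i ≤ (n : Int) := ⟨by omega, hi.2⟩
    have hwB : 0 ≤ w ∧ w ≤ capacity := ⟨by omega, hw.2⟩
    have hkB : 0 ≤ (K:Int)+1 ∧ (K:Int)+1 ≤ max_items := ⟨by omega, by push_cast at hK; omega⟩
    have hstep : ∀ val, pvGet3 (pvSet3 dpK i w ((K:Int)+1) val) = fun i' w' k' => pvGet3 (pvSet3 dpK i w ((K:Int)+1) val) i' w' k' := fun _ => rfl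
    -- unfold the step
    rw [pvStepK]
    by_cases hcond : PySem.List.pyGetD weights (i - 1) 0 ≤ w
    · rw [if_pos hcond]
      set wt := PySem.List.pyGetD weights (i - 1) 0 with hwt0
      set val := max (PySem.List.pyGetD values (i - 1) 0 +
              pvGet3 dpK (i - 1) (w - wt) ((K:Int) + 1 - 1))
           (pvGet3 dpK (i - 1) w ((K:Int)+1)) with hval
      have hvds : val = max (PySem.List.pyGetD values (i - 1) 0 +
              pvGet3 dp (i - 1) (w - wt) ((K:Int))) (pvGet3 dp (i - 1) w ((K:Int)+1)) := by
        rw [hval, ihU (i-1) (w-wt) ((K:Int)+1-1) (by omega) (by omega) (by omega) (Or.inl (by omega)),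
            ihU (i-1) w ((K:Int)+1) (by omega) (by omega) (by omega) (Or.inl (by omega))]
        norm_num
      refine ⟨pvShape_set3 n capacity max_items dpK i w ((K:Int)+1) val ihS hiB hwB hkB, ?_, ?_, ?_⟩
      · intro i' w' k' h1 h2 h3 hne
        rw [pvGet3_set3 n capacity max_items dpK i w ((K:Int)+1) val ihS hiB hwB hkB i' w' k' h1 h2 h3,
            if_neg (by tauto)]
        exact ihU i' w' k' h1 h2 h3 hne
      · intro k h1 h2
        rw [pvGet3_set3 n capacity max_items dpK i w ((K:Int)+1) val ihS hiB hwB hkB i w k (by omega) (by omega) (by omega)]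
        by_cases hk2 : k = (K:Int)+1
        · rw [if_pos ⟨rfl, rfl, hk2⟩, if_pos hcond, hvds, hk2]
          norm_num
        · rw [if_neg (by tauto)]
          exact ihF k h1 (by push_cast at h2; omega)
      · intro k h0 hk1
        rw [pvGet3_set3 n capacity max_items dpK i w ((K:Int)+1) val ihS hiB hwB hkB i w k (by omega) (by omega) h0,
            if_neg (by push_cast at hk1; rintro ⟨-, -, rfl⟩; omega)]
        exact ihZ k h0 (by push_cast at hk1; omega)
    · rw [if_neg hcond]
      set val := pvGet3 dpK (i - 1) w ((K:Int)+1) with hval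
      have hvds : val = pvGet3 dp (i - 1) w ((K:Int)+1) :=
        ihU (i-1) w ((K:Int)+1) (by omega) (by omega) (by omega) (Or.inl (by omega))
      refine ⟨pvShape_set3 n capacity max_items dpK i w ((K:Int)+1) val ihS hiB hwB hkB, ?_, ?_, ?_⟩
      · intro i' w' k' h1 h2 h3 hne
        rw [pvGet3_set3 n capacity max_items dpK i w ((K:Int)+1) val ihS hiB hwB hkB i' w' k' h1 h2 h3,
            if_neg (by tauto)]
        exact ihU i' w' k' h1 h2 h3 hne
      · intro k h1 h2
        rw [pvGet3_set3 n capacity max_items dpK i w ((K:Int)+1) val ihS hiB hwB hkB i w k (by omega) (by omega) (by omega)]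
        by_cases hk2 : k = (K:Int)+1
        · rw [if_pos ⟨rfl, rfl, hk2⟩, if_neg hcond, hvds, hk2]
        · rw [if_neg (by tauto)]
          exact ihF k h1 (by push_cast at h2; omega)
      · intro k h0 hk1
        rw [pvGet3_set3 n capacity max_items dpK i w ((K:Int)+1) val ihS hiB hwB hkB i w k (by omega) (by omega) h0,
            if_neg (by push_cast at hk1; rintro ⟨-, -, rfl⟩; omega)]
        exact ihZ k h0 (by push_cast at hk1; omega)

theorem pvLoopW (weights values : List Int) (capacity max_items : Int)
    (hm : 0 ≤ max_items) (n : Nat)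
    (i : Int) (hi : 1 ≤ i ∧ i ≤ (n : Int))
    (dp : List (List (List Int))) (hs : pvShape n capacity max_items dp)
    (W : Nat) (hW : (W : Int) ≤ capacity) :
    pvShape n capacity max_items
      ((PySem.List.pyRange 1 ((W : Int) + 1) 1).foldl (fun dp w =>
        (PySem.List.pyRange 1 (max_items + 1) 1).foldl (pvStepK weights values i w) dp) dp) ∧
    (∀ i' w' k' : Int, 0 ≤ i' → 0 ≤ w' → 0 ≤ k' → i' ≠ i →
      pvGet3 ((PySem.List.pyRange 1 ((W : Int) + 1) 1).foldl (fun dp w =>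
        (PySem.List.pyRange 1 (max_items + 1) 1).foldl (pvStepK weights values i w) dp) dp) i' w' k' = pvGet3 dp i' w' k') ∧
    (∀ w k : Int, 1 ≤ w → w ≤ (W : Int) → 1 ≤ k → k ≤ max_items →
      pvGet3 ((PySem.List.pyRange 1 ((W : Int) + 1) 1).foldl (fun dp w =>
        (PySem.List.pyRange 1 (max_items + 1) 1).foldl (pvStepK weights values i w) dp) dp) i w k =
        (if PySem.List.pyGetD weights (i - 1) 0 ≤ w then
            max (PySem.List.pyGetD values (i - 1) 0 +
                  pvGet3 dp (i - 1) (w - PySem.List.pyGetD weights (i - 1) 0) (k - 1))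
                (pvGet3 dp (i - 1) w k)
          else pvGet3 dp (i - 1) w k)) ∧
    (∀ w k : Int, 0 ≤ w → 0 ≤ k → (w ≤ 0 ∨ (W : Int) < w ∨ k ≤ 0) →
      pvGet3 ((PySem.List.pyRange 1 ((W : Int) + 1) 1).foldl (fun dp w =>
        (PySem.List.pyRange 1 (max_items + 1) 1).foldl (pvStepK weights values i w) dp) dp) i w k = pvGet3 dp i w k) := by
  set g : List (List (List Int)) → Int → List (List (List Int)) := fun dp w =>
      (PySem.List.pyRange 1 (max_items + 1) 1).foldl (pvStepK weights values i w) dp with hg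
  induction W with
  | zero =>
    rw [show (((0:Nat) : Int) + 1) = 1 by norm_num, PySem.List.pyRange_one_eq_nil (le_refl (1:Int))]
    exact ⟨hs, fun _ _ _ _ _ _ _ => rfl, fun w k h1 h2 _ _ => by omega, fun _ _ _ _ _ => rfl⟩
  | succ W ih =>
    have hW' : (W : Int) ≤ capacity := by push_cast at hW ⊢; omega
    obtain ⟨ihS, ihU, ihF, ihZ⟩ := ih hW'
    have hcast : (((W+1:Nat)) : Int) + 1 = ((W : Int) + 1) + 1 := by push_cast; ring
    rw [hcast, PySem.List.pyRange_one_succ_right (a := 1) (b := (W:Int)+1) (by omega), List.foldl_append, List.foldl_cons, List.foldl_nil]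
    set dpW := (PySem.List.pyRange 1 ((W:Int)+1) 1).foldl g dp with hdpW
    show pvShape n capacity max_items (g dpW ((W:Int)+1)) ∧ _
    rw [hg]
    have hmk : max_items + 1 = (max_items.toNat : Int) + 1 := by omega
    simp only [hmk]
    obtain ⟨kS, kU, kF, kZ⟩ := pvLoopK weights values capacity max_items n i ((W:Int)+1) hi
      ⟨by omega, by push_cast at hW; omega⟩ dpW ihS max_items.toNat (by omega)
    refine ⟨kS, ?_, ?_, ?_⟩
    · intro i' w' k' h1 h2 h3 hne
      rw [kU i' w' k' h1 h2 h3 (Or.inl hne)]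
      exact ihU i' w' k' h1 h2 h3 hne
    · intro w k hw1 hw2 hk1 hk2
      by_cases hww : w = (W:Int)+1
      · subst hww
        rw [kF k hk1 (by omega)]
        -- reads at row i-1 of dpW equal reads of dp
        by_cases hcond : PySem.List.pyGetD weights (i - 1) 0 ≤ (W:Int)+1
        · rw [if_pos hcond, if_pos hcond,
              ihU (i-1) ((W:Int)+1 - PySem.List.pyGetD weights (i - 1) 0) (k-1) (by omega) (by omega) (by omega) (by omega),
              ihU (i-1) ((W:Int)+1) k (by omega) (by omega) (by omega) (by omega)]
        · rw [if_neg hcond, if_neg hcond, ihU (i-1) ((W:Int)+1) k (by omega) (by omega) (by omega) (by omega)]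
      · rw [kU i w k (by omega) (by omega) (by omega) (Or.inr hww)]
        exact ihF w k hw1 (by push_cast at hw2; omega) hk1 hk2
    · intro w k h0w h0k hdeg
      rcases hdeg with h | h | h
      · -- w ≤ 0 : w ≠ W+1
        rw [kU i w k (by omega) h0w h0k (Or.inr (by omega))]
        exact ihZ w k h0w h0k (Or.inl h)
      · -- W+1 < w
        rw [kU i w k (by omega) h0w h0k (Or.inr (by push_cast at h; omega))]
        exact ihZ w k h0w h0k (Or.inr (Or.inl (by push_cast at h; omega)))
      · -- k ≤ 0
        by_cases hww : w = (W:Int)+1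
        · subst hww
          rw [kZ k h0k (Or.inl h)]
          exact ihZ _ k h0w h0k (Or.inr (Or.inr h))
        · rw [kU i w k (by omega) h0w h0k (Or.inr hww)]
          exact ihZ w k h0w h0k (Or.inr (Or.inr h))

theorem pvLoopI (weights values : List Int) (capacity max_items : Int)
    (hc : 0 ≤ capacity) (hm : 0 ≤ max_items)
    (hg : ∀ j : Nat, j < weights.length → weights.getD j 0 ≤ capacity → 0 ≤ weights.getD j 0)
    (m : Nat) (hmn : m ≤ weights.length) :
    pvShape weights.length capacity max_items
      ((PySem.List.pyRange 1 ((m : Int) + 1) 1).foldl (fun dp i =>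
        (PySem.List.pyRange 1 (capacity + 1) 1).foldl (fun dp w =>
          (PySem.List.pyRange 1 (max_items + 1) 1).foldl (pvStepK weights values i w) dp) dp)
        (pvInit (weights.length : Int) capacity max_items)) ∧
    (∀ (j : Nat) (w k : Int), j ≤ m → 0 ≤ w → w ≤ capacity → 0 ≤ k → k ≤ max_items →
      pvGet3 ((PySem.List.pyRange 1 ((m : Int) + 1) 1).foldl (fun dp i =>
        (PySem.List.pyRange 1 (capacity + 1) 1).foldl (fun dp w =>
          (PySem.List.pyRange 1 (max_items + 1) 1).foldl (pvStepK weights values i w) dp) dp)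
        (pvInit (weights.length : Int) capacity max_items)) (j : Int) w k = pvSolve weights values j w k) ∧
    (∀ (j : Nat) (w k : Int), m < j → j ≤ weights.length → 0 ≤ w → w ≤ capacity → 0 ≤ k → k ≤ max_items →
      pvGet3 ((PySem.List.pyRange 1 ((m : Int) + 1) 1).foldl (fun dp i =>
        (PySem.List.pyRange 1 (capacity + 1) 1).foldl (fun dp w =>
          (PySem.List.pyRange 1 (max_items + 1) 1).foldl (pvStepK weights values i w) dp) dp)
        (pvInit (weights.length : Int) capacity max_items)) (j : Int) w k = 0) := by
  set f : List (List (List Int)) → Int → List (List (List Int)) := fun dp i =>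
      (PySem.List.pyRange 1 (capacity + 1) 1).foldl (fun dp w =>
        (PySem.List.pyRange 1 (max_items + 1) 1).foldl (pvStepK weights values i w) dp) dp with hf
  induction m with
  | zero =>
    rw [show (((0:Nat) : Int) + 1) = 1 by norm_num, PySem.List.pyRange_one_eq_nil (le_refl (1:Int))]
    simp only [List.foldl_nil]
    refine ⟨pvShape_init _ _ _, ?_, ?_⟩
    · intro j w k hj h0w hwc h0k hkm
      have hj0 : j = 0 := by omega
      subst hj0
      rw [pvGet3_init weights.length capacity max_items _ _ _ ⟨by omega, by omega⟩ ⟨h0w, hwc⟩ ⟨h0k, hkm⟩]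
      rfl
    · intro j w k hj hjn h0w hwc h0k hkm
      exact pvGet3_init weights.length capacity max_items _ _ _ ⟨by omega, by exact_mod_cast Nat.cast_le.mpr hjn⟩ ⟨h0w, hwc⟩ ⟨h0k, hkm⟩
  | succ m ih =>
    have hmn' : m ≤ weights.length := by omega
    obtain ⟨ihS, ihV, ihZ⟩ := ih hmn'
    have hcast : (((m+1:Nat)) : Int) + 1 = ((m : Int) + 1) + 1 := by push_cast; ring
    rw [hcast, PySem.List.pyRange_one_succ_right (a := 1) (b := (m:Int)+1) (by omega), List.foldl_append, List.foldl_cons, List.foldl_nil]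
    set dpm := (PySem.List.pyRange 1 ((m:Int)+1) 1).foldl f (pvInit (weights.length : Int) capacity max_items) with hdpm
    show pvShape weights.length capacity max_items (f dpm ((m:Int)+1)) ∧ _
    rw [hf]
    have hcap : capacity + 1 = (capacity.toNat : Int) + 1 := by omega
    simp only [hcap]
    obtain ⟨wS, wU, wF, wZ⟩ := pvLoopW weights values capacity max_items hm weights.length
      ((m:Int)+1) ⟨by omega, by exact_mod_cast Nat.cast_le.mpr (by omega : m+1 ≤ weights.length)⟩ dpm ihS capacity.toNat (by omega)
    -- item weight at row m+1: index (m+1)-1 = m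
    have hidx : ((m:Int)+1) - 1 = ((m:Nat) : Int) := by ring
    have hwtval : PySem.List.pyGetD weights (((m:Int)+1) - 1) 0 = weights.getD m 0 := by
      rw [hidx, PySem.List.pyGetD_natCast]
    refine ⟨wS, ?_, ?_⟩
    · intro j w k hj h0w hwc h0k hkm
      by_cases hjm : j = m + 1
      · subst hjm
        rw [show (((m+1:Nat)):Int) = (m:Int)+1 by push_cast; ring]
        by_cases hwk : 1 ≤ w ∧ 1 ≤ k
        · rw [wF w k hwk.1 (by omega) hwk.2 hkm]
          -- compare with pvSolve (m+1) w k
          have hs1 : pvSolve weights values (m+1) w k =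
              (if PySem.List.pyGetD weights ((m:Nat) : Int) 0 ≤ w then
                (if PySem.List.pyGetD values ((m:Nat) : Int) 0 + pvSolve weights values m (w - PySem.List.pyGetD weights ((m:Nat) : Int) 0) (k - 1) > pvSolve weights values m w k
                 then PySem.List.pyGetD values ((m:Nat) : Int) 0 + pvSolve weights values m (w - PySem.List.pyGetD weights ((m:Nat) : Int) 0) (k - 1)
                 else pvSolve weights values m w k)
               else pvSolve weights values m w k) := by
            rw [pvSolve]
            rw [if_neg (by omega)]
          rw [hs1, hwtval]
          by_cases hcond : weights.getD m 0 ≤ w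
          · have hwt0 : 0 ≤ weights.getD m 0 := by
              by_cases hmlt : m < weights.length
              · exact hg m hmlt (by omega)
              · rw [List.getD_eq_default]; omega
            rw [if_pos hcond, if_pos (by rw [PySem.List.pyGetD_natCast]; exact hcond), hidx]
            rw [ihV m (w - weights.getD m 0) (k-1) (le_refl m) (by omega) (by omega) (by omega) (by omega),
                ihV m w k (le_refl m) (by omega) (by omega) (by omega) (by omega)]
            rw [PySem.List.pyGetD_natCast weights m 0]
            by_cases h : PySem.List.pyGetD values ((m:Nat):Int) 0 + pvSolve weights values m (w - weights.getD m 0) (k - 1) ≤ pvSolve weights values m w k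
            · rw [if_neg (by omega), max_eq_right h]
            · rw [if_pos (by omega), max_eq_left (by omega)]
          · rw [if_neg hcond, if_neg (by rw [PySem.List.pyGetD_natCast]; exact hcond)]
            rw [hidx]
            exact ihV m w k (le_refl m) (by omega) (by omega) (by omega) (by omega)
        · -- w = 0 or k = 0
          have : w = 0 ∨ k = 0 := by omega
          rw [wZ w k h0w h0k (by omega)]
          have hzero : pvGet3 dpm ((m:Int)+1) w k = 0 := by
            have h2 := ihZ (m+1) w k (by omega) (by omega) h0w hwc h0k hkm
            rw [show (((m+1:Nat)):Int) = (m:Int)+1 by push_cast; ring] at h2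
            exact h2
          rw [hzero, pvSolve, if_pos (by omega)]
      · have hjm' : j ≤ m := by omega
        rw [wU (j:Int) w k (by omega) h0w h0k (by omega)]
        exact ihV j w k hjm' h0w hwc h0k hkm
    · intro j w k hj hjn h0w hwc h0k hkm
      rw [wU (j:Int) w k (by omega) h0w h0k (by omega)]
      exact ihZ j w k (by omega) hjn h0w hwc h0k hkm

-- ===== VERDICT (by name: the statement is the Claim_ definition above) =====
theorem knapsack_with_constraints_spec : Claim_equal_knapsack_with_constraints := by
  intro weights values capacity max_items _ hpre
  obtain ⟨hc, hm, hdis⟩ := hpre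
  unfold Spec_knapsack_with_constraints knapsack_with_constraints knapsack_with_constraints_alt
  simp only []
  rcases hdis with h0 | h0 | hg
  · -- capacity = 0: the w-loop is empty and the whole table stays zero
    subst h0
    rw [show (0:Int) + 1 = 1 from by norm_num,
        PySem.List.pyRange_one_eq_nil (le_refl (1:Int))]
    simp only [List.foldl_nil, pvFoldlConst]
    rw [pvGet3_init weights.length 0 max_items _ _ _ ⟨by omega, le_refl _⟩ ⟨le_refl _, le_refl _⟩ ⟨hm, le_refl _⟩,
        pvSolve_w_nonpos weights values weights.length 0 max_items (le_refl 0)]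
  · -- max_items = 0: the k-loop is empty and the whole table stays zero
    subst h0
    rw [show (0:Int) + 1 = 1 from by norm_num,
        PySem.List.pyRange_one_eq_nil (le_refl (1:Int))]
    simp only [List.foldl_nil, pvFoldlConst]
    rw [pvGet3_init weights.length capacity 0 _ _ _ ⟨by omega, le_refl _⟩ ⟨hc, le_refl _⟩ ⟨le_refl _, le_refl _⟩,
        pvSolve_k_nonpos weights values weights.length capacity 0 (le_refl 0)]
  · -- main case: every item reachable within the capacity has a value entry and a
    -- nonnegative weight, so the filled table matches the recursion row by row
    have hgw : ∀ j : Nat, j < weights.length → weights.getD j 0 ≤ capacity → 0 ≤ weights.getD j 0 := by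
      intro j hj hle
      exact (hg j (List.mem_range.mpr hj) hle).2
    obtain ⟨_, hV, _⟩ := pvLoopI weights values capacity max_items hc hm hgw weights.length (le_refl _)
    exact hV weights.length capacity max_items (le_refl _) hc (le_refl _) hm (le_refl _)
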